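-- pv_equiv track=rewrite | github.com/Adeon18/Game_numbers | number_functions.py | ulam_number_initial
-- ===== SOURCE A (Python) =====
-- def ulam_number_initial (number : int) -> bool :
--     '''
--     Return True if number is Ulam's and False otherwise.
--     >>> ulam_number(197)
--     True
--     >>> ulam_number(1)
--     True
--     >>> ulam_number(5)
--     False
--     >>> ulam_number(199)
--     False
--     '''
--     result = False
--     ulam_list = []
--     ulam_list.append(1)
--     ulam_list.append(2)
--     for _ in range (3, number+1) :
--         for potential_ulam_num in range (3, number+1) :
--             count = 0
--             for i in range (len(ulam_list)) :
--                 for j in range (i+1, len(ulam_list)) :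
--                     if ulam_list[i] + ulam_list[j] == potential_ulam_num and potential_ulam_num > max(ulam_list) :
--                         count += 1
--             if count == 1 :
--                 ulam_list.append(potential_ulam_num)
--                 break
--     if number in ulam_list :
--         result = True
--     return result
-- ===== SOURCE B (Python) =====
-- def ulam_number_initial(number: int) -> bool:
--     # Incremental Ulam-sequence generation: keep a dict of pair-sum counts,
--     # extend by the smallest sum > last that is representable exactly once.
--     ulam = [1, 2]
--     counts = {3: 1}
--     last = 2
--     while True:
--         nxt = None
--         for s in range(last + 1, number + 1):
--             if counts.get(s, 0) == 1:
--                 nxt = s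
--                 break
--         if nxt is None:
--             break
--         for v in ulam:
--             counts[nxt + v] = counts.get(nxt + v, 0) + 1
--         ulam.append(nxt)
--         last = nxt
--     return number in ulam
-- ===== Notes on version B (the rewrite author's own statement) =====
-- stated objective: faster
-- what changed: Replaces A's quadruple loop (each round rescans every candidate from scratch and recounts all index pairs, recomputing the list maximum inside the innermost test) by incremental Ulam-sequence generation: a dict of pair-sum counts is updated once per new term and the next term is the first sum beyond the last term that is representable exactly once.
import Mathlib
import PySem

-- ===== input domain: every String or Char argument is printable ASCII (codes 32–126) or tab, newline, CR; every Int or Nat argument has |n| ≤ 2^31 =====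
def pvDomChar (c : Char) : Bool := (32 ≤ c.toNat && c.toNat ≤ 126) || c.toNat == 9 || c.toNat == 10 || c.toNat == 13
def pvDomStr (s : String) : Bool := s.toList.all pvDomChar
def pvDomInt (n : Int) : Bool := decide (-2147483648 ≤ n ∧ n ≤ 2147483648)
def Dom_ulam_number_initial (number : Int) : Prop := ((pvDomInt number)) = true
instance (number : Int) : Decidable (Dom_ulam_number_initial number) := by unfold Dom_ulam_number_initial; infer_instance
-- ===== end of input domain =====

-- B replaces A's quadruple loop (rescan all candidates, recount all pairs each round) by
-- incremental Ulam-sequence generation with a dict of pair-sum counts (objective: faster).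

-- ===== PORT A =====
-- max(ulam_list); the list is never empty in A, so the `.getD 0` default is unreachable
def pvMaxOf (l : List Int) : Int := (PySem.List.max? l (fun x => x)).getD 0

-- A's two inner loops: for i in range(len(l)): for j in range(i+1, len(l)): if l[i]+l[j]==c and c>max(l): count += 1
-- (indices produced by range are always in bounds, so l[i] is ported as l.getD i 0)
def pvCountA (l : List Int) (c : Int) : Nat :=
  (List.range l.length).foldl (fun cnt i =>
    (List.range' (i+1) (l.length - (i+1))).foldl (fun cnt2 j =>
      if l.getD i 0 + l.getD j 0 = c ∧ pvMaxOf l < c then cnt2 + 1 else cnt2) cnt) 0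

-- one round of A's outer loop: first candidate in range(3, number+1) with count == 1 is appended
def pvStepA (number : Int) (l : List Int) : List Int :=
  match (PySem.List.pyRange 3 (number+1) 1).find? (fun c => pvCountA l c == 1) with
  | some c => l ++ [c]
  | none => l

def ulam_number_initial (number : Int) : Bool :=
  ((PySem.List.pyRange 3 (number+1) 1).foldl (fun l _ => pvStepA number l) [1, 2]).contains number

-- ===== PORT B =====
-- first s in range(last+1, number+1) with counts.get(s, 0) == 1
def pvNextB (counts : PySem.Dict Int Int) (last number : Int) : Option Int :=
  (PySem.List.pyRange (last+1) (number+1) 1).find? (fun s => counts.getD s 0 == 1)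

-- for v in ulam: counts[nxt+v] = counts.get(nxt+v, 0) + 1
def pvBump (counts : PySem.Dict Int Int) (nxt : Int) (ulam : List Int) : PySem.Dict Int Int :=
  ulam.foldl (fun d v => d.insert (nxt + v) (d.getD (nxt + v) 0 + 1)) counts

-- B's while-True loop; terminates because each new term is strictly larger and ≤ number
def pvLoopB (number : Int) (ulam : List Int) (counts : PySem.Dict Int Int) (last : Int) :
    List Int :=
  match h : pvNextB counts last number with
  | none => ulam
  | some s => pvLoopB number (ulam ++ [s]) (pvBump counts s ulam) s
termination_by (number - last).toNat
decreasing_by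
  have hmem := List.mem_of_find?_eq_some h
  have := (PySem.List.mem_pyRange_one).mp hmem
  omega

def ulam_number_initial_alt (number : Int) : Bool :=
  (pvLoopB number [1, 2] (PySem.Dict.ofList [(3, 1)]) 2).contains number

-- ===== PRECONDITION & SPEC =====
def Spec_ulam_number_initial (number : Int) (out : Bool) : Prop := out = ulam_number_initial_alt number
instance (number : Int) (out : Bool) : Decidable (Spec_ulam_number_initial number out) := by unfold Spec_ulam_number_initial; infer_instance

-- ===== CLAIM (what is proved, stated in full; the proofs are below) =====
def Claim_equal_ulam_number_initial : Prop := ∀ (number : Int), Dom_ulam_number_initial number → Spec_ulam_number_initial number (ulam_number_initial number)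

-- ===== LEMMAS AND PROOFS =====

-- structural pair-sum count: number of index pairs i < j with l[i] + l[j] = c
def pvPair : List Int → Int → Nat
  | [], _ => 0
  | x :: xs, c => xs.countP (fun y => decide (x + y = c)) + pvPair xs c

def pvLast (l : List Int) : Int := l.getLast?.getD 0

def pvInv (l : List Int) : Prop := (∃ t, l = 1 :: 2 :: t) ∧ l.Pairwise (· < ·)

-- canonical incremental closure both programs compute
def pvClose (number : Int) (l : List Int) (last : Int) : List Int :=
  match h : (PySem.List.pyRange (last+1) (number+1) 1).find? (fun c => pvPair l c == 1) with
  | none => l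
  | some s => pvClose number (l ++ [s]) s
termination_by (number - last).toNat
decreasing_by
  have hmem := List.mem_of_find?_eq_some h
  have := (PySem.List.mem_pyRange_one).mp hmem
  omega

-- loop-shape helpers
theorem pvFoldIf (P : Nat → Prop) [DecidablePred P] : ∀ (xs : List Nat) (a : Nat),
    xs.foldl (fun acc j => if P j then acc+1 else acc) a = a + xs.countP (fun j => decide (P j)) := by
  intro xs
  induction xs with
  | nil => simp
  | cons x t ih =>
    intro a
    by_cases h : P x <;> simp [h, ih, List.countP_cons] <;> omega

theorem pvFoldAddInit (f : Nat → Nat) : ∀ (xs : List Nat) (a : Nat),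
    xs.foldl (fun acc i => acc + f i) a = a + xs.foldl (fun acc i => acc + f i) 0 := by
  intro xs
  induction xs with
  | nil => simp
  | cons x t ih =>
    intro a
    rw [List.foldl_cons, List.foldl_cons, ih, ih (0 + f x)]
    omega

theorem pvFoldId {α β : Type} (xs : List α) (a : β) : xs.foldl (fun acc _ => acc) a = a := by
  induction xs <;> simp_all

theorem pvCountP_range_getD (p : Int → Bool) (d : Int) : ∀ (xs : List Int),
    (List.range xs.length).countP (fun k => p (xs.getD k d)) = xs.countP p := by
  intro xs
  induction xs with
  | nil => simp
  | cons x t ih =>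
    rw [List.length_cons, List.range_succ_eq_map, List.countP_cons, List.countP_map]
    simp only [Function.comp_def, List.getD_cons_succ, List.getD_cons_zero]
    rw [ih, List.countP_cons]

theorem pvSumPairs (c : Int) : ∀ (l : List Int),
    (List.range l.length).foldl
      (fun cnt i => cnt + (List.range' (i+1) (l.length-(i+1))).countP
        (fun j => decide (l.getD i 0 + l.getD j 0 = c))) 0
    = pvPair l c := by
  intro l
  induction l with
  | nil => simp [pvPair]
  | cons x xs ih =>
    rw [List.length_cons, List.range_succ_eq_map, List.foldl_cons, List.foldl_map]
    have hfun : (fun (cnt i : Nat) => cnt + (List.range' (i+1+1) (xs.length+1-(i+1+1))).countP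
          (fun j => decide ((x::xs).getD (i+1) 0 + (x::xs).getD j 0 = c)))
        = (fun (cnt i : Nat) => cnt + (List.range' (i+1) (xs.length-(i+1))).countP
          (fun j => decide (xs.getD i 0 + xs.getD j 0 = c))) := by
      funext cnt i
      have hlen : xs.length+1-(i+1+1) = xs.length - (i+1) := by omega
      rw [hlen, List.range'_eq_map_range, List.range'_eq_map_range, List.countP_map, List.countP_map]
      congr 2
      funext k
      simp only [Function.comp_def]
      rw [show i+1+1+k = (i+1+k)+1 from by omega]
      simp [List.getD_cons_succ]
    have hhead : (List.range' (0+1) (xs.length+1-(0+1))).countP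
        (fun j => decide ((x::xs).getD 0 0 + (x::xs).getD j 0 = c))
        = xs.countP (fun y => decide (x + y = c)) := by
      have hlen : xs.length+1-(0+1) = xs.length := by omega
      rw [hlen, List.range'_eq_map_range, List.countP_map]
      have h2 : ((fun j => decide ((x::xs).getD 0 0 + (x::xs).getD j 0 = c)) ∘ (fun k => 0+1+k))
          = (fun k => (fun y => decide (x + y = c)) (xs.getD k 0)) := by
        funext k
        simp only [Function.comp_def]
        rw [show 0+1+k = k+1 from by omega]
        simp
      rw [h2]
      exact pvCountP_range_getD (fun y => decide (x + y = c)) 0 xs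
    rw [hfun, pvFoldAddInit (fun i => (List.range' (i+1) (xs.length-(i+1))).countP
        (fun j => decide (xs.getD i 0 + xs.getD j 0 = c))), ih, hhead]
    simp [pvPair]

-- L1: A's index-pair count equals the structural count gated by the max test
theorem pvCountA_eq (l : List Int) (c : Int) :
    pvCountA l c = if pvMaxOf l < c then pvPair l c else 0 := by
  unfold pvCountA
  by_cases hmax : pvMaxOf l < c
  · rw [if_pos hmax]
    have hfun : (fun (cnt i : Nat) => (List.range' (i+1) (l.length-(i+1))).foldl
          (fun cnt2 j => if l.getD i 0 + l.getD j 0 = c ∧ pvMaxOf l < c then cnt2 + 1 else cnt2) cnt)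
        = (fun (cnt i : Nat) => cnt + (List.range' (i+1) (l.length-(i+1))).countP
          (fun j => decide (l.getD i 0 + l.getD j 0 = c))) := by
      funext cnt i
      rw [pvFoldIf (fun j => l.getD i 0 + l.getD j 0 = c ∧ pvMaxOf l < c)]
      have h2 : (fun j => decide (l.getD i 0 + l.getD j 0 = c ∧ pvMaxOf l < c))
          = (fun j => decide (l.getD i 0 + l.getD j 0 = c)) := by
        funext j
        simp [hmax]
      rw [h2]
    rw [hfun]
    exact pvSumPairs c l
  · rw [if_neg hmax]
    have hfun : (fun (cnt i : Nat) => (List.range' (i+1) (l.length-(i+1))).foldl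
          (fun cnt2 j => if l.getD i 0 + l.getD j 0 = c ∧ pvMaxOf l < c then cnt2 + 1 else cnt2) cnt)
        = (fun (cnt : Nat) (_ : Nat) => cnt) := by
      funext cnt i
      rw [pvFoldIf (fun j => l.getD i 0 + l.getD j 0 = c ∧ pvMaxOf l < c)]
      have h2 : (fun j => decide (l.getD i 0 + l.getD j 0 = c ∧ pvMaxOf l < c))
          = (fun (_ : Nat) => false) := by
        funext j
        simp [hmax]
      rw [h2]
      simp
    rw [hfun]
    exact pvFoldId _ 0


-- every element of a strictly increasing list is at most its last element
theorem pvLe_last (l : List Int) (h : l.Pairwise (· < ·)) : ∀ y ∈ l, y ≤ pvLast l := by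
  induction l with
  | nil => simp
  | cons x t ih =>
    intro y hy
    rcases List.mem_cons.mp hy with rfl | hyt
    · cases t with
      | nil => simp [pvLast]
      | cons a u =>
        have hx : y < a := (List.pairwise_cons.mp h).1 a (by simp)
        have ha := ih (List.pairwise_cons.mp h).2 a (by simp)
        have hl : pvLast (y :: a :: u) = pvLast (a :: u) := by simp [pvLast]
        omega
    · have hy2 := ih (List.pairwise_cons.mp h).2 y hyt
      have hl : pvLast (x :: t) = pvLast t := by
        cases t with
        | nil => cases hyt
        | cons a u => simp [pvLast]
      omega

-- L2: on a strictly increasing nonempty list, max is the last element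
theorem pvMaxOf_eq_last (l : List Int) (h : l.Pairwise (· < ·)) (hne : l ≠ []) :
    pvMaxOf l = pvLast l := by
  obtain ⟨m, hm⟩ : ∃ m, PySem.List.max? l (fun x => x) = some m := by
    cases hmax : PySem.List.max? l (fun x => x) with
    | none => exact absurd ((PySem.List.max?_eq_none_iff _ _).mp hmax) hne
    | some m => exact ⟨m, rfl⟩
  have hmem := PySem.List.max?_mem hm
  have hmax := PySem.List.max?_isMax hm
  have h1 : m ≤ pvLast l := pvLe_last l h m hmem
  have h2 : pvLast l ≤ m := by
    have h3 := hmax (l.getLast hne) (List.getLast_mem hne)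
    have he : pvLast l = l.getLast hne := by
      simp [pvLast, List.getLast?_eq_some_getLast hne]
    simpa [he] using h3
  simp [pvMaxOf, hm]
  omega

theorem pvFind?_congr {α : Type} (p q : α → Bool) : ∀ (xs : List α),
    (∀ x ∈ xs, p x = q x) → xs.find? p = xs.find? q := by
  intro xs
  induction xs with
  | nil => intro _; rfl
  | cons x t ih =>
    intro h
    rw [List.find?_cons, List.find?_cons, h x (by simp)]
    cases hq : q x
    · exact ih (fun y hy => h y (by simp [hy]))
    · rfl

-- L3: A's scan from 3 equals the canonical scan from last+1
theorem pvStepA_eq (number : Int) (l : List Int) (h : pvInv l) :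
    pvStepA number l =
      match (PySem.List.pyRange (pvLast l + 1) (number+1) 1).find? (fun c => pvPair l c == 1) with
      | none => l
      | some s => l ++ [s] := by
  obtain ⟨⟨t, ht⟩, hp⟩ := h
  have hne : l ≠ [] := by simp [ht]
  have hmax := pvMaxOf_eq_last l hp hne
  have h2last : 2 ≤ pvLast l := pvLe_last l hp 2 (by simp [ht])
  have hkey : (PySem.List.pyRange 3 (number+1) 1).find? (fun c => pvCountA l c == 1)
      = (PySem.List.pyRange (pvLast l + 1) (number+1) 1).find? (fun c => pvPair l c == 1) := by
    by_cases hn : number ≤ pvLast l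
    · rw [List.find?_eq_none.mpr, List.find?_eq_none.mpr]
      · intro c hc
        have := (PySem.List.mem_pyRange_one).mp hc
        omega
      · intro c hc
        have hcc := (PySem.List.mem_pyRange_one).mp hc
        rw [pvCountA_eq, hmax, if_neg (by omega)]
        simp
    · rw [PySem.List.pyRange_one_append 3 (pvLast l + 1) (number+1) (by omega) (by omega),
        List.find?_append]
      have h1 : (PySem.List.pyRange 3 (pvLast l + 1) 1).find? (fun c => pvCountA l c == 1) = none := by
        apply List.find?_eq_none.mpr
        intro c hc
        have hcc := (PySem.List.mem_pyRange_one).mp hc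
        rw [pvCountA_eq, hmax, if_neg (by omega)]
        simp
      rw [h1, Option.none_or]
      apply pvFind?_congr
      intro c hc
      have hcc := (PySem.List.mem_pyRange_one).mp hc
      rw [pvCountA_eq, hmax, if_pos (by omega)]
  unfold pvStepA
  rw [hkey]
  cases List.find? (fun c => pvPair l c == 1) (PySem.List.pyRange (pvLast l + 1) (number + 1) 1) <;> rfl


-- L4: the dict invariant
def pvDInv (counts : PySem.Dict Int Int) (l : List Int) : Prop :=
  ∀ s : Int, counts.getD s 0 = (pvPair l s : Int)

theorem pvBump_getD (l : List Int) (nxt s0 : Int) (d : PySem.Dict Int Int) :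
    (pvBump d nxt l).getD s0 0 = d.getD s0 0 + (l.countP (fun v => decide (nxt + v = s0)) : Int) := by
  induction l generalizing d with
  | nil => simp [pvBump]
  | cons v t ih =>
    have : pvBump d nxt (v :: t) = pvBump (d.insert (nxt + v) (d.getD (nxt + v) 0 + 1)) nxt t := rfl
    rw [this, ih, PySem.Dict.getD_insert, List.countP_cons]
    by_cases h : s0 = nxt + v
    · rw [if_pos h, h]
      simp
      omega
    · rw [if_neg h]
      simp only [show (decide (nxt + v = s0)) = false by simp; omega]
      push_cast
      omega

theorem pvPair_append (l : List Int) (s c : Int) :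
    pvPair (l ++ [s]) c = pvPair l c + l.countP (fun v => decide (s + v = c)) := by
  induction l with
  | nil => simp [pvPair]
  | cons x t ih =>
    simp only [List.cons_append, pvPair, ih, List.countP_cons, List.countP_append]
    have h1 : (decide (x + s = c) : Bool) = decide (s + x = c) := by
      by_cases h : x + s = c
      · simp [h, show s + x = c by omega]
      · simp [h, show ¬ s + x = c by omega]
    simp [List.countP_cons, h1]
    omega

theorem pvDInv_bump (counts : PySem.Dict Int Int) (l : List Int) (s : Int)
    (h : pvDInv counts l) : pvDInv (pvBump counts s l) (l ++ [s]) := by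
  intro s0
  rw [pvBump_getD, pvPair_append, h s0]
  push_cast
  ring

-- L5: B's loop computes the canonical closure
theorem pvLoopB_eq (number : Int) : ∀ (m : Nat) (l : List Int) (counts : PySem.Dict Int Int)
    (last : Int), (number - last).toNat = m → pvDInv counts l →
    pvLoopB number l counts last = pvClose number l last := by
  intro m
  induction m using Nat.strong_induction_on with
  | _ m ih =>
    intro l counts last hm hd
    have hpred : (fun s => counts.getD s 0 == 1) = (fun s : Int => pvPair l s == 1) := by
      funext s
      rw [hd s]
      by_cases h : pvPair l s = 1
      · simp [h]
      · have h2 : (pvPair l s : Int) ≠ 1 := by omega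
        simp [h, h2]
    rw [pvLoopB, pvClose]
    unfold pvNextB
    rw [hpred]
    cases hfind : (PySem.List.pyRange (last+1) (number+1) 1).find? (fun s : Int => pvPair l s == 1) with
    | none => simp [hfind]
    | some s =>
      simp only [hfind]
      have hmem := (PySem.List.mem_pyRange_one).mp (List.mem_of_find?_eq_some hfind)
      exact ih (number - s).toNat (by omega) _ _ s rfl (pvDInv_bump counts l s hd)

-- L6a: once no candidate is found, further rounds of A change nothing
theorem pvFoldA_fixed (number : Int) (xs : List Int) (l : List Int) (h : pvInv l)
    (hnone : (PySem.List.pyRange (pvLast l + 1) (number+1) 1).find?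
      (fun c => pvPair l c == 1) = none) :
    xs.foldl (fun l _ => pvStepA number l) l = l := by
  induction xs with
  | nil => rfl
  | cons y t ih =>
    rw [List.foldl_cons, pvStepA_eq number l h, hnone]
    exact ih

theorem pvLast_concat (l : List Int) (s : Int) : pvLast (l ++ [s]) = s := by
  simp [pvLast]

theorem pvInv_concat (l : List Int) (s : Int) (h : pvInv l) (hs : pvLast l < s) :
    pvInv (l ++ [s]) := by
  obtain ⟨⟨t, ht⟩, hp⟩ := h
  refine ⟨⟨t ++ [s], by simp [ht]⟩, ?_⟩
  rw [List.pairwise_append]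
  refine ⟨hp, by simp, ?_⟩
  intro x hx y hy
  have hxl := pvLe_last l hp x hx
  simp at hy
  omega


-- L6: A's (number-2)-round fold reaches the canonical closure
theorem pvFoldA_eq (number : Int) : ∀ (xs : List Int) (l : List Int), pvInv l →
    (number - pvLast l).toNat ≤ xs.length →
    xs.foldl (fun l _ => pvStepA number l) l = pvClose number l (pvLast l) := by
  intro xs
  induction xs with
  | nil =>
    intro l hinv hlen
    rw [pvClose]
    have hnil : PySem.List.pyRange (pvLast l + 1) (number+1) 1 = [] :=
      PySem.List.pyRange_one_eq_nil (by simp at hlen; omega)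
    rw [hnil]
    rfl
  | cons y t ih =>
    intro l hinv hlen
    rw [List.foldl_cons, pvStepA_eq number l hinv, pvClose]
    cases hfind : (PySem.List.pyRange (pvLast l + 1) (number+1) 1).find? (fun c => pvPair l c == 1) with
    | none =>
      simp only
      exact pvFoldA_fixed number t l hinv hfind
    | some s =>
      simp only
      have hmem := (PySem.List.mem_pyRange_one).mp (List.mem_of_find?_eq_some hfind)
      have hinv' := pvInv_concat l s hinv (by omega)
      have := ih (l ++ [s]) hinv' (by rw [pvLast_concat]; simp at hlen ⊢; omega)
      rw [this, pvLast_concat]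


theorem pvDInv_init : pvDInv (PySem.Dict.ofList [(3, 1)]) [1, 2] := by
  intro s
  by_cases h : s = 3
  · subst h; rfl
  · have h1 : (PySem.Dict.ofList [((3 : Int), (1 : Int))]).getD s 0 = 0 := by
      have : PySem.Dict.ofList [((3 : Int), (1 : Int))] = PySem.Dict.mk [(3, 1)] := by rfl
      rw [this, PySem.Dict.getD, PySem.Dict.get?_mk_cons,
        if_neg (by simp; omega : ¬ ((3 : Int) == s) = true)]
      rfl
    have h2 : pvPair [1, 2] s = 0 := by
      simp [pvPair, List.countP_cons]
      omega
    rw [h1, h2]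
    rfl

theorem pvLast_init : pvLast [1, 2] = 2 := by simp [pvLast]

-- ===== VERDICT (by name: the statement is the Claim_ definition above) =====
theorem ulam_number_initial_spec : Claim_equal_ulam_number_initial := by
  intro number _
  unfold Spec_ulam_number_initial ulam_number_initial ulam_number_initial_alt
  have hA := pvFoldA_eq number (PySem.List.pyRange 3 (number+1) 1) [1, 2]
    ⟨⟨[], rfl⟩, by decide⟩
    (by rw [pvLast_init, PySem.List.length_pyRange_one]; omega)
  have hB := pvLoopB_eq number (number - 2).toNat [1, 2] (PySem.Dict.ofList [(3, 1)]) 2 rfl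
    pvDInv_init
  rw [pvLast_init] at hA
  rw [hA, hB]
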